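-- pv_equiv track=rewrite | github.com/ssorry123/ProblemSolving | 00_Kakao/1차_뉴스클러스터링.py | JOINT
-- ===== SOURCE A (Python) =====
-- def check_alpha(c):
--     a = ord('a')
--     z = ord('z')
--     if ord(c) <= z and ord(c) >= a:
--         return True
--     return False
--
-- def make_set_dict(sss):
--     s1set = dict()
--     s1 = ''
--     for i in range(len(sss)):
--         c = sss[i]
--         # 영문자인경우
--         if check_alpha(c):
--             s1 += c
--         # 영문자가 아닌 경우 초기화
--         else:
--             s1 = ''
--
--         # 영문자 두개를 만든 경우, 같은 원소가 이미 있다면 카운트 증가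
--         if len(s1) == 2:
--             if s1 in s1set:
--                 s1set[s1] += 1
--             else:
--                 s1set[s1] = 1
--             s1 = s1[1] # 두글자 중 뒷글자부터 다시 시작
--     return s1set
--
-- def JOINT(str1, str2):
--     s1 = make_set_dict(str1)
--     s2 = make_set_dict(str2)
--     ret = dict()
--     for k in s2:
--         if k in s1:
--             ret[k] = min(s1[k], s2[k])
--     return ret
-- ===== SOURCE B (Python) =====
-- # B: direct adjacent-pair scan (zip) + get-based counters + dict comprehension,
-- # replacing A's stateful accumulate-and-reset machine. Objective: simpler.
-- def _bigrams(s):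
--     return [a + b for a, b in zip(s, s[1:]) if 'a' <= a <= 'z' and 'a' <= b <= 'z']
--
-- def _count(pairs):
--     c = {}
--     for p in pairs:
--         c[p] = c.get(p, 0) + 1
--     return c
--
-- def JOINT(str1, str2):
--     c1 = _count(_bigrams(str1))
--     c2 = _count(_bigrams(str2))
--     return {k: min(c1[k], v) for k, v in c2.items() if k in c1}
-- ===== Notes on version B (the rewrite author's own statement) =====
-- stated objective: simpler
-- what changed: Replaces A's stateful accumulate-and-reset bigram machine with a direct zip-adjacent-pair scan filtered on both chars being lowercase letters, a plain get-based counter, and a dict comprehension over the second counter's items for the multiset intersection.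
import Mathlib
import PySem

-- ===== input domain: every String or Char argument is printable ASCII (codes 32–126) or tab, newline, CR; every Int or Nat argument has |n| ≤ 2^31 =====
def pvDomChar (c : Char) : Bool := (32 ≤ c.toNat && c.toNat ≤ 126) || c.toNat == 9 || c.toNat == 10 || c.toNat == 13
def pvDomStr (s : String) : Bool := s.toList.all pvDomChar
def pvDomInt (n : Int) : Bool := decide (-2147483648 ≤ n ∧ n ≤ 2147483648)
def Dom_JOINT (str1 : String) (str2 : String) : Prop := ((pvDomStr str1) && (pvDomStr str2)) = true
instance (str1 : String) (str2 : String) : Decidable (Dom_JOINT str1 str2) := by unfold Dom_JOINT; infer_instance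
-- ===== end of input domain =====

-- B replaces A's accumulate-and-reset bigram machine by a zip-adjacent-pair scan + counter; objective: simpler.

-- ===== PORT A =====
def checkAlpha (c : Char) : Bool :=
  -- a = ord('a'); z = ord('z'); if ord(c) <= z and ord(c) >= a: return True; return False
  if c.toNat ≤ 'z'.toNat ∧ c.toNat ≥ 'a'.toNat then true else false

-- one iteration of make_set_dict's loop body; the running str s1 is kept as a List Char
def msdStep (st : PySem.Dict String Int × List Char) (c : Char) : PySem.Dict String Int × List Char :=
  let s1 := if checkAlpha c then st.2 ++ [c] else []
  if s1.length = 2 then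
    let key := String.ofList s1
    let d := if st.1.contains key then st.1.insert key (st.1.getD key 0 + 1)  -- s1set[s1] += 1 (key present, default 0 unreachable)
             else st.1.insert key 1
    -- s1 = s1[1]
    (d, match PySem.List.pyGet? s1 1 with | some ch => [ch] | none => [])
  else (st.1, s1)

def makeSetDict (sss : String) : PySem.Dict String Int :=
  (sss.toList.foldl msdStep (PySem.Dict.empty, [])).1

def JOINT (str1 : String) (str2 : String) : List (String × Int) :=
  let s1 := makeSetDict str1
  let s2 := makeSetDict str2
  -- for k in s2: if k in s1: ret[k] = min(s1[k], s2[k])   (both lookups guarded: k is in s1 and a key of s2, so the defaults are unreachable)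
  (s2.keys.foldl (fun ret k =>
      if s1.contains k then ret.insert k (min (s1.getD k 0) (s2.getD k 0)) else ret)
    PySem.Dict.empty).items

-- ===== PORT B =====
def isLow (c : Char) : Bool := decide ('a' ≤ c ∧ c ≤ 'z')

def bigramsB (s : String) : List String :=
  ((s.toList.zip s.toList.tail).filter (fun q => isLow q.1 && isLow q.2)).map
    (fun q => String.ofList [q.1, q.2])

def countB (pairs : List String) : PySem.Dict String Int :=
  pairs.foldl (fun d p => d.insert p (d.getD p 0 + 1)) PySem.Dict.empty

def JOINT_alt (str1 : String) (str2 : String) : List (String × Int) :=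
  let c1 := countB (bigramsB str1)
  let c2 := countB (bigramsB str2)
  -- {k: min(c1[k], v) for k, v in c2.items() if k in c1}   (c1[k] guarded by "k in c1", so the default 0 is unreachable)
  (c2.items.foldl (fun r kv =>
      if c1.contains kv.1 then r.insert kv.1 (min (c1.getD kv.1 0) kv.2) else r)
    PySem.Dict.empty).items

-- ===== PRECONDITION & SPEC =====
def Spec_JOINT (str1 : String) (str2 : String) (out : List (String × Int)) : Prop := out = JOINT_alt str1 str2
instance (str1 : String) (str2 : String) (out : List (String × Int)) : Decidable (Spec_JOINT str1 str2 out) := by unfold Spec_JOINT; infer_instance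

-- ===== CLAIM (what is proved, stated in full; the proofs are below) =====
def Claim_equal_JOINT : Prop := ∀ (str1 : String) (str2 : String), Dom_JOINT str1 str2 → Spec_JOINT str1 str2 (JOINT str1 str2)

-- ===== LEMMAS AND PROOFS =====

-- the alphabetic bigrams of a char list, scanned left to right
def pairsOf : List Char → List String
  | a :: b :: rest =>
      (if checkAlpha a && checkAlpha b then [String.ofList [a, b]] else []) ++ pairsOf (b :: rest)
  | _ => []

theorem isLow_eq_checkAlpha (c : Char) : isLow c = checkAlpha c := by
  unfold isLow checkAlpha
  have h : ('a' ≤ c ∧ c ≤ 'z') ↔ (c.toNat ≤ 'z'.toNat ∧ c.toNat ≥ 'a'.toNat) := by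
    rw [Char.le_def, Char.le_def, UInt32.le_iff_toNat_le, UInt32.le_iff_toNat_le]
    exact ⟨fun ⟨x, y⟩ => ⟨y, x⟩, fun ⟨x, y⟩ => ⟨y, x⟩⟩
  by_cases hp : ('a' ≤ c ∧ c ≤ 'z')
  · rw [if_pos (h.mp hp)]
    simp [hp]
  · rw [if_neg (fun hx => hp (h.mpr hx))]
    simp [hp]

theorem bigramsB_eq_pairsOf (l : List Char) :
    ((l.zip l.tail).filter (fun q => isLow q.1 && isLow q.2)).map
      (fun q => String.ofList [q.1, q.2]) = pairsOf l := by
  match l with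
  | [] => simp [pairsOf]
  | [a] => simp [pairsOf]
  | a :: b :: rest =>
    have ih := bigramsB_eq_pairsOf (b :: rest)
    simp only [List.tail_cons, List.zip_cons_cons, List.filter_cons, pairsOf,
      isLow_eq_checkAlpha] at *
    by_cases h : (checkAlpha a && checkAlpha b) = true <;> simp [h, ih]

-- the two-branch dict update in A is the unconditional get-default update
theorem update_eq (d : PySem.Dict String Int) (k : String) :
    (if d.contains k then d.insert k (d.getD k 0 + 1) else d.insert k 1) =
      d.insert k (d.getD k 0 + 1) := by
  by_cases h : d.contains k = true
  · simp [h]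
  · simp only [Bool.not_eq_true] at h
    simp [h, PySem.Dict.getD_of_not_contains d 0 h]

theorem pairsOf_not_alpha (c : Char) (cs : List Char) (h : checkAlpha c = false) :
    pairsOf (c :: cs) = pairsOf cs := by
  cases cs with
  | nil => simp [pairsOf]
  | cons b rest => simp [pairsOf, h]

-- loop invariant of make_set_dict: the pending buffer is empty or one alphabetic char,
-- and the fold counts exactly the remaining alphabetic bigrams
theorem msd_loop (cs : List Char) :
    ∀ (d : PySem.Dict String Int) (p : List Char),
      (p = [] ∨ ∃ a, p = [a] ∧ checkAlpha a = true) →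
      (cs.foldl msdStep (d, p)).1 =
        (pairsOf (p ++ cs)).foldl (fun d q => d.insert q (d.getD q 0 + 1)) d := by
  induction cs with
  | nil =>
    rintro d p (rfl | ⟨a, rfl, _⟩) <;> simp [pairsOf]
  | cons c cs ih =>
    rintro d p (rfl | ⟨a, rfl, ha⟩)
    · by_cases hc : checkAlpha c = true
      · have := ih d [c] (Or.inr ⟨c, rfl, hc⟩)
        simpa [msdStep, hc] using this
      · simp only [Bool.not_eq_true] at hc
        have := ih d [] (Or.inl rfl)
        simpa [msdStep, hc, pairsOf_not_alpha c cs hc] using this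
    · by_cases hc : checkAlpha c = true
      · have h2 := ih (d.insert (String.ofList [a, c]) (d.getD (String.ofList [a, c]) 0 + 1)) [c]
          (Or.inr ⟨c, rfl, hc⟩)
        simp only [List.singleton_append] at h2
        simp only [List.cons_append, List.nil_append, pairsOf, ha, hc, Bool.and_self,
          if_true, List.foldl_cons]
        rw [← h2]
        simp [msdStep, hc, update_eq, PySem.List.pyGet?, PySem.List.pyIdx?]
      · simp only [Bool.not_eq_true] at hc
        have := ih d [] (Or.inl rfl)
        have hp : pairsOf (a :: c :: cs) = pairsOf cs := by
          rw [show pairsOf (a :: c :: cs) =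
              (if checkAlpha a && checkAlpha c then [String.ofList [a, c]] else []) ++ pairsOf (c :: cs) from rfl]
          simp [hc, pairsOf_not_alpha c cs hc]
        simpa [msdStep, hc, hp] using this

theorem makeSetDict_eq_countB (s : String) : makeSetDict s = countB (bigramsB s) := by
  unfold makeSetDict countB bigramsB
  rw [bigramsB_eq_pairsOf]
  exact msd_loop s.toList PySem.Dict.empty [] (Or.inl rfl)

theorem nodup_keys_countB (pairs : List String) : (countB pairs).keys.Nodup := by
  unfold countB
  exact PySem.Dict.nodup_keys_foldl_insert pairs _ _ (by simp [PySem.Dict.keys_empty])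

-- ===== VERDICT (by name: the statement is the Claim_ definition above) =====
theorem JOINT_spec : Claim_equal_JOINT := by
  intro str1 str2 _
  show JOINT str1 str2 = JOINT_alt str1 str2
  simp only [JOINT, JOINT_alt, makeSetDict_eq_countB]
  rw [PySem.Dict.items_eq_map_keys (countB (bigramsB str2)) (nodup_keys_countB _) 0,
    List.foldl_map]
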